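-- pv_equiv track=rewrite | github.com/River-Mt/Algorithm | 프로그래머스/unrated/150369. 택배 배달과 수거하기/택배 배달과 수거하기.py | solution
-- ===== SOURCE A (Python) =====
-- def reverse_arrays(deliveries, pickups):
--     deliveries.reverse()
--     pickups.reverse()
--
-- def solution(cap, n, deliveries, pickups):
--     answer = 0
--     reverse_arrays(deliveries, pickups)
--
--     idx = 0
--     d_sum = 0
--     p_sum = 0
--
--     while idx < n:
--         d_sum += deliveries[idx]
--         p_sum += pickups[idx]
--
--         while d_sum > 0 or p_sum > 0:
--             d_sum -= cap
--             p_sum -= cap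
--             answer += (n - idx) * 2
--
--         idx += 1
--
--     return answer
-- ===== SOURCE B (Python) =====
-- def solution(cap, n, deliveries, pickups):
--     # O(n): trips per index via ceiling division instead of repeated decrement.
--     # Note: unlike A, this does not reverse the input lists in place.
--     rd = deliveries[::-1]
--     rp = pickups[::-1]
--     answer = 0
--     d = p = 0
--     for i in range(n):
--         d += rd[i]
--         p += rp[i]
--         k = max(-(-d // cap), -(-p // cap), 0)
--         answer += k * (n - i) * 2
--         d -= k * cap
--         p -= k * cap
--     return answer
-- ===== Notes on version B (the rewrite author's own statement) =====
-- stated objective: alternative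
-- what changed: The inner while loop that decrements d_sum/p_sum by cap one trip at a time is replaced by a per-index ceiling-division trip count, O(n) instead of O(n + total/cap) (intended as faster, but a timing run did not confirm a speedup on the generated inputs); B also copies the lists instead of reversing them in place (return value unchanged).
-- outside the precondition, e.g. on solution(0, 1, [0], [0]): A returns 0, B raises ZeroDivisionError; on solution(-2, 1, [-5], [0]): A returns 0, B returns 6; on solution(-1, 1, [0], [0]): A returns 0, B returns 0
import Mathlib
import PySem

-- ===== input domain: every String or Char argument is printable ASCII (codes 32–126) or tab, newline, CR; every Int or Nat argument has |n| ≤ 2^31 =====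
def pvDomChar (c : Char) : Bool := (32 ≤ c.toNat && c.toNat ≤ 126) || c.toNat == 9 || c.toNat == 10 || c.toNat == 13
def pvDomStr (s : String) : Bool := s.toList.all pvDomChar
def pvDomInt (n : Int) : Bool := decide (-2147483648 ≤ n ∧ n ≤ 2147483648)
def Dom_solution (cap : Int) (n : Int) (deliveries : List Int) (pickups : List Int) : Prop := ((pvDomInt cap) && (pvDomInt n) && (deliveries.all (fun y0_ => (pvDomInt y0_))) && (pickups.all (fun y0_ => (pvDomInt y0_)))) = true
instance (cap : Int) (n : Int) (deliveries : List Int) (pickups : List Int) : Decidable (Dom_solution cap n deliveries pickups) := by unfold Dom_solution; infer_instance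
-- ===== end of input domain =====

-- B replaces A's inner decrement-by-cap loop with a per-index ceiling-division trip count, O(n)
-- instead of O(n + total/cap) (intended as faster; a timing run did not confirm a speedup on
-- its generated inputs); A also reverses its argument lists in place, B does not — the equivalence
-- proved is about the RETURN value only.

-- ===== PORT A =====
-- inner 'while d_sum > 0 or p_sum > 0' loop; fuel is only a totality device: the caller passes
-- (max d p).toNat, which under Pre_solution (1 ≤ cap) is never exhausted before the condition fails
-- (for cap ≤ 0 the Python loop diverges; such inputs are outside Pre_solution).
def solInner (cap : Int) (n : Int) (idx : Int) : Nat → Int → Int → Int → Int × Int × Int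
  | 0, d, p, ans => (d, p, ans)
  | fuel + 1, d, p, ans =>
    if 0 < d ∨ 0 < p then
      solInner cap n idx fuel (d - cap) (p - cap) (ans + (n - idx) * 2)
    else (d, p, ans)

-- outer 'while idx < n' loop over the (already reversed) lists; fuel = (n - idx).toNat, again only
-- a totality device, never exhausted while idx < n
def solOuter (cap : Int) (n : Int) (rd : List Int) (rp : List Int) :
    Nat → Int → Int → Int → Int → Int
  | 0, _idx, _d, _p, ans => ans
  | fuel + 1, idx, d, p, ans =>
    if idx < n then
      let d1 := d + PySem.List.pyGetD rd idx 0
      let p1 := p + PySem.List.pyGetD rp idx 0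
      let s := solInner cap n idx (max d1 p1).toNat d1 p1 ans
      solOuter cap n rd rp fuel (idx + 1) s.1 s.2.1 s.2.2
    else ans

def solution (cap : Int) (n : Int) (deliveries : List Int) (pickups : List Int) : Int :=
  solOuter cap n deliveries.reverse pickups.reverse n.toNat 0 0 0 0

-- ===== PORT B =====
-- step of B's 'for i in range(n)' loop; -(-x // cap) is Python ceiling division
def altStep (cap : Int) (n : Int) (rd : List Int) (rp : List Int)
    (st : Int × Int × Int) (i : Int) : Int × Int × Int :=
  let d := st.1 + PySem.List.pyGetD rd i 0
  let p := st.2.1 + PySem.List.pyGetD rp i 0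
  let k := max (-(PySem.Int.floordiv (-d) cap)) (max (-(PySem.Int.floordiv (-p) cap)) 0)
  (d - k * cap, p - k * cap, st.2.2 + k * (n - i) * 2)

def solution_alt (cap : Int) (n : Int) (deliveries : List Int) (pickups : List Int) : Int :=
  let rd := deliveries.reverse
  let rp := pickups.reverse
  ((PySem.List.pyRange 0 n 1).foldl (altStep cap n rd rp) (0, 0, 0)).2.2

-- ===== PRECONDITION & SPEC =====
-- Pre_ excludes cap ≤ 0 — there A's inner loop diverges whenever some prefix sum is positive, and in
-- the degenerate all-nonpositive cases where A does return, B's ceiling division raises (cap = 0) or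
-- yields a different, equally accidental value (cap < 0) — and n beyond the list lengths, where A
-- raises IndexError.
def Pre_solution (cap : Int) (n : Int) (deliveries : List Int) (pickups : List Int) : Prop :=
  1 ≤ cap ∧ n ≤ (deliveries.length : Int) ∧ n ≤ (pickups.length : Int)
instance (cap : Int) (n : Int) (deliveries : List Int) (pickups : List Int) : Decidable (Pre_solution cap n deliveries pickups) := by unfold Pre_solution; infer_instance

def pvWitness_solution : Int × Int × List Int × List Int := (4, 3, [1, 0, 3], [0, 3, 2])

def Spec_solution (cap : Int) (n : Int) (deliveries : List Int) (pickups : List Int) (out : Int) : Prop := out = solution_alt cap n deliveries pickups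
instance (cap : Int) (n : Int) (deliveries : List Int) (pickups : List Int) (out : Int) : Decidable (Spec_solution cap n deliveries pickups out) := by unfold Spec_solution; infer_instance

-- ===== CLAIM (what is proved, stated in full; the proofs are below) =====
def Claim_equal_solution : Prop := ∀ (cap : Int) (n : Int) (deliveries : List Int) (pickups : List Int), Dom_solution cap n deliveries pickups → Pre_solution cap n deliveries pickups → Spec_solution cap n deliveries pickups (solution cap n deliveries pickups)

-- ===== LEMMAS AND PROOFS =====

-- the ceiling-division trip count
def trips (cap d p : Int) : Int :=
  max (-(PySem.Int.floordiv (-d) cap)) (max (-(PySem.Int.floordiv (-p) cap)) 0)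

lemma ceil_nonpos {cap d : Int} (hc : 0 < cap) (hd : d ≤ 0) :
    -(PySem.Int.floordiv (-d) cap) ≤ 0 := by
  rw [PySem.Int.floordiv_eq_ediv_of_pos hc]
  have := Int.ediv_nonneg (a := -d) (b := cap) (by omega) (by omega)
  omega

lemma ceil_pos {cap d : Int} (hc : 0 < cap) (hd : 0 < d) :
    1 ≤ -(PySem.Int.floordiv (-d) cap) := by
  have h := (PySem.Int.floordiv_lt_iff_lt_mul (a := -d) (b := cap) (q := 0) hc).mpr (by omega)
  omega

lemma ceil_le {cap d q : Int} (hc : 0 < cap) (hq : d ≤ q * cap) :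
    -(PySem.Int.floordiv (-d) cap) ≤ q := by
  have h := (PySem.Int.le_floordiv_iff_mul_le (a := -d) (b := cap) (q := -q) hc).mpr (by rw [neg_mul]; omega)
  omega

lemma ceil_sub {cap d : Int} (hc : 0 < cap) :
    -(PySem.Int.floordiv (-(d - cap)) cap) = -(PySem.Int.floordiv (-d) cap) - 1 := by
  rw [PySem.Int.floordiv_eq_ediv_of_pos hc, PySem.Int.floordiv_eq_ediv_of_pos hc]
  have h : -(d - cap) = -d + 1 * cap := by ring
  rw [h, Int.add_mul_ediv_right _ _ (by omega : cap ≠ 0)]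
  omega

-- the trip count fits under the fuel the outer loop hands to solInner
lemma trips_le_fuel {cap d p : Int} (hc : 1 ≤ cap) :
    trips cap d p ≤ ((max d p).toNat : Int) := by
  have hq : (0:Int) ≤ ((max d p).toNat : Int) := by positivity
  have hqc : ((max d p).toNat : Int) ≤ ((max d p).toNat : Int) * cap :=
    le_mul_of_one_le_right hq hc
  have h1 := ceil_le (cap := cap) (d := d) (q := ((max d p).toNat : Int)) (by omega) (by omega)
  have h2 := ceil_le (cap := cap) (d := p) (q := ((max d p).toNat : Int)) (by omega) (by omega)
  unfold trips; omega

-- closed form for A's inner loop, given enough fuel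
lemma solInner_eq (cap n idx : Int) (hc : 1 ≤ cap) :
    ∀ (fuel : Nat) (d p ans : Int), trips cap d p ≤ (fuel : Int) →
      solInner cap n idx fuel d p ans
        = (d - trips cap d p * cap, p - trips cap d p * cap,
           ans + trips cap d p * (n - idx) * 2) := by
  intro fuel
  induction fuel with
  | zero =>
    intro d p ans hf
    have hd : d ≤ 0 ∧ p ≤ 0 := by
      by_contra hcon
      have : 1 ≤ trips cap d p := by
        unfold trips
        rcases (by omega : 0 < d ∨ 0 < p) with h | h
        · have := ceil_pos (cap := cap) (by omega) h; omega
        · have := ceil_pos (cap := cap) (by omega) h; omega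
      omega
    have hk : trips cap d p = 0 := by
      have h1 := ceil_nonpos (cap := cap) (d := d) (by omega) hd.1
      have h2 := ceil_nonpos (cap := cap) (d := p) (by omega) hd.2
      unfold trips; omega
    simp [solInner, hk]
  | succ fuel ih =>
    intro d p ans hf
    by_cases h : 0 < d ∨ 0 < p
    · rw [solInner, if_pos h]
      have hk : trips cap (d - cap) (p - cap) = trips cap d p - 1 := by
        unfold trips
        rw [ceil_sub (by omega), ceil_sub (by omega)]
        have h1' : 1 ≤ -(PySem.Int.floordiv (-d) cap) ∨ 1 ≤ -(PySem.Int.floordiv (-p) cap) := by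
          rcases h with h | h
          · exact Or.inl (ceil_pos (by omega) h)
          · exact Or.inr (ceil_pos (by omega) h)
        omega
      rw [ih (d - cap) (p - cap) (ans + (n - idx) * 2) (by omega), hk]
      refine Prod.ext (by ring_nf) (Prod.ext (by ring_nf) (by ring_nf))
    · rw [solInner, if_neg h]
      have hdp : d ≤ 0 ∧ p ≤ 0 := by
        by_contra hcon
        exact h (by omega)
      have hk : trips cap d p = 0 := by
        have h1 := ceil_nonpos (cap := cap) (d := d) (by omega) hdp.1
        have h2 := ceil_nonpos (cap := cap) (d := p) (by omega) hdp.2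
        unfold trips; omega
      rw [hk]
      refine Prod.ext (by ring) (Prod.ext (by ring) (by ring))

-- A's outer loop is B's fold over the remaining range, given enough fuel
lemma solOuter_eq (cap n : Int) (rd rp : List Int) (hc : 1 ≤ cap) :
    ∀ (fuel : Nat) (idx d p ans : Int), n - idx ≤ (fuel : Int) →
      solOuter cap n rd rp fuel idx d p ans
        = ((PySem.List.pyRange idx n 1).foldl (altStep cap n rd rp) (d, p, ans)).2.2 := by
  intro fuel
  induction fuel with
  | zero =>
    intro idx d p ans hf
    have hr : PySem.List.pyRange idx n 1 = [] := by
      simp [PySem.List.pyRange]; omega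
    rw [hr, List.foldl_nil, solOuter]
  | succ fuel ih =>
    intro idx d p ans hf
    by_cases h : idx < n
    · rw [solOuter, if_pos h]
      simp only []
      rw [ih (idx + 1) _ _ _ (by omega), PySem.List.pyRange_one_cons h,
        List.foldl_cons]
      have hs :
          ((solInner cap n idx
              (max (d + PySem.List.pyGetD rd idx 0) (p + PySem.List.pyGetD rp idx 0)).toNat
              (d + PySem.List.pyGetD rd idx 0) (p + PySem.List.pyGetD rp idx 0) ans).1,
            (solInner cap n idx
              (max (d + PySem.List.pyGetD rd idx 0) (p + PySem.List.pyGetD rp idx 0)).toNat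
              (d + PySem.List.pyGetD rd idx 0) (p + PySem.List.pyGetD rp idx 0) ans).2.1,
            (solInner cap n idx
              (max (d + PySem.List.pyGetD rd idx 0) (p + PySem.List.pyGetD rp idx 0)).toNat
              (d + PySem.List.pyGetD rd idx 0) (p + PySem.List.pyGetD rp idx 0) ans).2.2)
            = altStep cap n rd rp (d, p, ans) idx := by
        rw [solInner_eq cap n idx hc _ _ _ _ (trips_le_fuel hc)]
        unfold altStep trips
        simp only []
      rw [hs]
    · rw [solOuter, if_neg h]
      have hr : PySem.List.pyRange idx n 1 = [] := by
        simp [PySem.List.pyRange]; omega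
      rw [hr, List.foldl_nil]

-- ===== VERDICT (by name: the statement is the Claim_ definition above) =====
theorem solution_spec : Claim_equal_solution := by
  intro cap n deliveries pickups _ hpre
  show solution cap n deliveries pickups = solution_alt cap n deliveries pickups
  unfold solution solution_alt
  exact solOuter_eq cap n deliveries.reverse pickups.reverse hpre.1 n.toNat 0 0 0 0 (by omega)
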